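-- pv_equiv track=rewrite | github.com/mfchen0703/grid-puzzle-experiment | model code/fitting/fit_softmax.py | count_effective_colors
-- ===== SOURCE A (Python) =====
-- NUM_COLORS = 4
--
-- def is_color_legal(region_id, color, adjacency, current_colors):
--     """颜色是否合法（不与邻居冲突）。"""
--     for nb in adjacency[region_id]:
--         if current_colors[nb] == color:
--             return False
--     return True
--
-- def count_effective_colors(region_id, adjacency, current_colors, used_colors):
--     """计算 Canonical Color Normalization 下的有效颜色数。
--
--     有效颜色数 = 已使用且合法的颜色数 + (1 if 存在未使用且合法的颜色)
--     因为所有未使用颜色在规范化映射下等价，只算 1 个。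
--     """
--     legal = [
--         c for c in range(NUM_COLORS)
--         if is_color_legal(region_id, c, adjacency, current_colors)
--     ]
--     n_used_legal = sum(1 for c in legal if c in used_colors)
--     n_unused_legal = sum(1 for c in legal if c not in used_colors)
--     return n_used_legal + (1 if n_unused_legal > 0 else 0)
-- ===== SOURCE B (Python) =====
-- NUM_COLORS = 4
--
-- def count_effective_colors(region_id, adjacency, current_colors, used_colors):
--     # One pass over the neighbors builds the forbidden-color set; then a single
--     # pass over the palette classifies each non-forbidden color as used/unused.
--     forbidden = {current_colors[nb] for nb in adjacency[region_id]}
--     used = set(used_colors)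
--     n_used_legal = 0
--     has_unused_legal = False
--     for c in range(NUM_COLORS):
--         if c in forbidden:
--             continue
--         if c in used:
--             n_used_legal += 1
--         else:
--             has_unused_legal = True
--     return n_used_legal + (1 if has_unused_legal else 0)
-- ===== Notes on version B (the rewrite author's own statement) =====
-- stated objective: simpler
-- what changed: A rescans the neighbor list once per candidate color (and then filters the legal list twice); B builds the forbidden neighbor-color set in one neighbor pass and classifies the four palette colors in a single pass with a counter and a flag.
-- outside the precondition, e.g. on count_effective_colors(0, {0: [1, 2, 3, 4, 5]}, {1: 0, 2: 1, 3: 2, 4: 3}, set()): A returns 0, B raises KeyError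
import Mathlib
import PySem

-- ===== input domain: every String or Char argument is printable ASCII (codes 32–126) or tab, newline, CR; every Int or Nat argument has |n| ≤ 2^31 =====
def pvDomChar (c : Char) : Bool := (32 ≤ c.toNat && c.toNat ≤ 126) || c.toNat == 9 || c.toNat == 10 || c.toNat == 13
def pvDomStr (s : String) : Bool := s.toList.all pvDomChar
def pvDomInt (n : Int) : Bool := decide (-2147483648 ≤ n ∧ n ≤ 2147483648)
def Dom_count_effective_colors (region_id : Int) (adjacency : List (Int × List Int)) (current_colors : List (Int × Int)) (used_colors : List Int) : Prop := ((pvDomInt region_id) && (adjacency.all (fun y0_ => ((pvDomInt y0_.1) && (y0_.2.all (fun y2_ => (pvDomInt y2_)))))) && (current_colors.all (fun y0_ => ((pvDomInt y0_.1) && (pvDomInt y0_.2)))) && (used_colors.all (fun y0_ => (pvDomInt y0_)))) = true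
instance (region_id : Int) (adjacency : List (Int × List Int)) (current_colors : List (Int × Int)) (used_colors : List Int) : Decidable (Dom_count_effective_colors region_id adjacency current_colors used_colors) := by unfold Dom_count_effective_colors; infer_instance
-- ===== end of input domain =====

-- B builds the forbidden neighbor-color set once and classifies the palette in one pass,
-- instead of A's per-color neighbor rescans and double filtering of the legal list (objective: simpler).

-- ===== PORT A =====
-- for nb in adjacency[region_id]: if current_colors[nb] == color: return False / return True
def pyLegalLoop (color : Int) (current_colors : List (Int × Int)) : List Int → Bool
  | [] => true
  | nb :: rest =>
      if (PySem.Dict.mk current_colors).getD nb 0 == color then false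
      else pyLegalLoop color current_colors rest

def is_color_legal_port (region_id : Int) (color : Int) (adjacency : List (Int × List Int)) (current_colors : List (Int × Int)) : Bool :=
  pyLegalLoop color current_colors ((PySem.Dict.mk adjacency).getD region_id [])

def count_effective_colors (region_id : Int) (adjacency : List (Int × List Int)) (current_colors : List (Int × Int)) (used_colors : List Int) : Int :=
  let legal := (PySem.List.pyRange 0 4 1).filter
      (fun c => is_color_legal_port region_id c adjacency current_colors)
  let n_used_legal : Int := ((legal.filter (fun c => used_colors.contains c)).length : Int)
  let n_unused_legal : Int := ((legal.filter (fun c => !used_colors.contains c)).length : Int)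
  n_used_legal + (if n_unused_legal > 0 then 1 else 0)

-- ===== PORT B =====
def count_effective_colors_alt (region_id : Int) (adjacency : List (Int × List Int)) (current_colors : List (Int × Int)) (used_colors : List Int) : Int :=
  let forbidden : PySem.Set Int := PySem.Set.ofList
      (((PySem.Dict.mk adjacency).getD region_id []).map
        (fun nb => (PySem.Dict.mk current_colors).getD nb 0))
  let used : PySem.Set Int := PySem.Set.ofList used_colors
  let st := (PySem.List.pyRange 0 4 1).foldl
      (fun (st : Int × Bool) c =>
        if PySem.Set.contains forbidden c then st
        else if PySem.Set.contains used c then (st.1 + 1, st.2)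
        else (st.1, true)) (0, false)
  st.1 + (if st.2 then 1 else 0)

-- ===== PRECONDITION & SPEC =====
-- Pre_ excludes exactly the inputs where the Python raises KeyError: region_id missing from
-- adjacency, or a neighbor missing from current_colors.  A can still RETURN on some of the
-- latter (its early return may skip the missing neighbor on every color), but B's single
-- forbidden-set pass always reads every neighbor and raises there, so those inputs are excluded.
def Pre_count_effective_colors (region_id : Int) (adjacency : List (Int × List Int)) (current_colors : List (Int × Int)) (used_colors : List Int) : Prop :=
  (PySem.Dict.mk adjacency).contains region_id = true ∧
  ∀ nb ∈ ((PySem.Dict.mk adjacency).get? region_id).getD [],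
    (PySem.Dict.mk current_colors).contains nb = true
instance (region_id : Int) (adjacency : List (Int × List Int)) (current_colors : List (Int × Int)) (used_colors : List Int) : Decidable (Pre_count_effective_colors region_id adjacency current_colors used_colors) := by unfold Pre_count_effective_colors; infer_instance

def pvWitness_count_effective_colors : Int × (List (Int × List Int)) × (List (Int × Int)) × List Int :=
  (0, [(0, [1, 2]), (1, [0])], [(0, 1), (1, 2), (2, 0)], [0, 1])

def Spec_count_effective_colors (region_id : Int) (adjacency : List (Int × List Int)) (current_colors : List (Int × Int)) (used_colors : List Int) (out : Int) : Prop := out = count_effective_colors_alt region_id adjacency current_colors used_colors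
instance (region_id : Int) (adjacency : List (Int × List Int)) (current_colors : List (Int × Int)) (used_colors : List Int) (out : Int) : Decidable (Spec_count_effective_colors region_id adjacency current_colors used_colors out) := by unfold Spec_count_effective_colors; infer_instance

-- ===== CLAIM (what is proved, stated in full; the proofs are below) =====
def Claim_equal_count_effective_colors : Prop := ∀ (region_id : Int) (adjacency : List (Int × List Int)) (current_colors : List (Int × Int)) (used_colors : List Int), Dom_count_effective_colors region_id adjacency current_colors used_colors → Pre_count_effective_colors region_id adjacency current_colors used_colors → Spec_count_effective_colors region_id adjacency current_colors used_colors (count_effective_colors region_id adjacency current_colors used_colors)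

-- ===== LEMMAS AND PROOFS =====

-- A's early-return neighbor scan decides exactly "color is not among the neighbor colors".
lemma pyLegalLoop_eq (color : Int) (cc : List (Int × Int)) (nbs : List Int) :
    pyLegalLoop color cc nbs
      = !((nbs.map (fun nb => (PySem.Dict.mk cc).getD nb 0)).contains color) := by
  induction nbs with
  | nil => simp [pyLegalLoop]
  | cons nb rest ih =>
      by_cases h : (PySem.Dict.mk cc).getD nb 0 = color
      · simp [pyLegalLoop, h]
      · simp [pyLegalLoop, h, ih, Ne.symm h]

-- B's fold invariant: starting from (k, b) it adds the legal-used count and ORs "some legal unused".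
lemma foldl_inv (F U : Int → Bool) (cs : List Int) (k : Int) (b : Bool) :
    cs.foldl (fun (st : Int × Bool) c =>
        if F c then st
        else if U c then (st.1 + 1, st.2)
        else (st.1, true)) (k, b)
      = (k + ((cs.filter (fun c => !F c && U c)).length : Int),
         b || cs.any (fun c => !F c && !U c)) := by
  induction cs generalizing k b with
  | nil => simp
  | cons c rest ih =>
      cases hF : F c <;> cases hU : U c <;>
        simp [ih, hF, hU] <;> ring_nf

theorem flag_bridge (cols used rng : List Int) :
    (if (↑((rng.filter (fun c => !cols.contains c)).filter (fun c => !used.contains c)).length : Int) > 0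
     then (1:Int) else 0)
      = if (rng.any fun c => !cols.contains c && !used.contains c) = true then (1:Int) else 0 := by
  simp [List.filter_filter, Int.natCast_pos, List.length_pos_iff,
        List.filter_eq_nil_iff, List.any_eq_true, Bool.and_comm]

theorem count_effective_colors_spec_aux (region_id : Int) (adjacency : List (Int × List Int)) (current_colors : List (Int × Int)) (used_colors : List Int) :
    count_effective_colors region_id adjacency current_colors used_colors
      = count_effective_colors_alt region_id adjacency current_colors used_colors := by
  unfold count_effective_colors count_effective_colors_alt is_color_legal_port
  have hmem : ∀ (l : List Int) (c : Int),
      List.contains (PySem.Set.ofList l) c = l.contains c := by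
    intro l c
    simp [PySem.Set.mem_ofList]
  simp only [pyLegalLoop_eq, foldl_inv, PySem.Set.contains, hmem, Bool.false_or, zero_add]
  congr 1
  · simp [List.filter_filter, Bool.and_comm]
  · exact flag_bridge _ _ _

-- ===== VERDICT (by name: the statement is the Claim_ definition above) =====
theorem count_effective_colors_spec : Claim_equal_count_effective_colors := by
  intro region_id adjacency current_colors used_colors _ _
  exact count_effective_colors_spec_aux region_id adjacency current_colors used_colors
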